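-- pv_equiv track=rewrite | github.com/Discusser/vaq-make | test/main.py | get_diff_str
-- ===== SOURCE A (Python) =====
-- RESET = "\033[0m"
--
-- RED = "\033[0;31m"
--
-- def get_diff_str(expected: str, found: str):
--     diff: list[str] = []
--     previous_was_wrong = False
--     for index, char in enumerate(found):
--         if index >= len(expected):
--             if not previous_was_wrong:
--                 diff += RED
--                 previous_was_wrong = True
--         else:
--             if char != expected[index] and not previous_was_wrong:
--                 diff += RED
--                 previous_was_wrong = True
--             elif char == expected[index] and previous_was_wrong:
--                 diff += RESET
--                 previous_was_wrong = False
--         diff += char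
--     diff += RESET
--     return "".join(diff)
-- ===== SOURCE B (Python) =====
-- from itertools import groupby
--
-- RESET = "\033[0m"
--
-- RED = "\033[0;31m"
--
-- def get_diff_str(expected: str, found: str):
--     wrong_flags = [i >= len(expected) or c != expected[i] for i, c in enumerate(found)]
--     out = []
--     prev = False
--     for wrong, run in groupby(zip(wrong_flags, found), key=lambda t: t[0]):
--         if wrong != prev:
--             out.append(RED if wrong else RESET)
--         out.append("".join(c for _, c in run))
--         prev = wrong
--     out.append(RESET)
--     return "".join(out)
-- ===== Notes on version B (the rewrite author's own statement) =====
-- stated objective: alternative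
-- what changed: Replaces the inline per-character toggle state machine with a two-phase structure: first compute a per-position wrongness flag list, then groupby maximal runs of equal wrongness and emit one color marker per run boundary.
import Mathlib
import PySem

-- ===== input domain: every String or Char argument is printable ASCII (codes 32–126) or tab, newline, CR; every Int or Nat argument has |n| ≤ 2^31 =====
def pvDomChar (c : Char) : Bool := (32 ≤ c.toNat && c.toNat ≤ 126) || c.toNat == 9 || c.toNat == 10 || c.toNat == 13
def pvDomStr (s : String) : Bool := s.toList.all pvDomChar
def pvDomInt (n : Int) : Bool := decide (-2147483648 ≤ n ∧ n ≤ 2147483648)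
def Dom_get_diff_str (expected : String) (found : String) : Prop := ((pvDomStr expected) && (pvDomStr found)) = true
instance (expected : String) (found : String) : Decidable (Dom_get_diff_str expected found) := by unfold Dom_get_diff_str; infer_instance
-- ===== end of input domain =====

-- B is an alternative decomposition of A (flags list + run grouping instead of an inline toggle state machine); same O(n) cost.

-- ===== PORT A =====
def pvRESET : List Char := "\x1b[0m".toList

def pvRED : List Char := "\x1b[0;31m".toList

-- A's for-loop over enumerate(found): state (diff, previous_was_wrong), index carried explicitly
def pvALoop (el : List Char) (index : Nat) (diff : List Char) (prev : Bool) :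
    List Char → List Char × Bool
  | [] => (diff, prev)
  | char :: rest =>
      let st :=
        if el.length ≤ index then
          if !prev then (diff ++ pvRED, true) else (diff, prev)
        else
          if char ≠ el.getD index ' ' ∧ ¬ prev then (diff ++ pvRED, true)
          else if char = el.getD index ' ' ∧ prev then (diff ++ pvRESET, false)
          else (diff, prev)
      pvALoop el (index + 1) (st.1 ++ [char]) st.2 rest

def get_diff_str (expected : String) (found : String) : String :=
  String.ofList ((pvALoop expected.toList 0 [] false found.toList).1 ++ pvRESET)

-- ===== PORT B =====
-- per-position wrongness flags paired with the characters (B's comprehension + zip)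
def pvFlags (el : List Char) (i : Nat) : List Char → List (Bool × Char)
  | [] => []
  | c :: rest =>
      ((if el.length ≤ i then true else decide (c ≠ el.getD i ' ')), c) :: pvFlags el (i + 1) rest

-- itertools.groupby: maximal runs of equal flag
def pvRuns : List (Bool × Char) → List (Bool × List Char)
  | [] => []
  | (f, c) :: rest =>
      (f, c :: (rest.takeWhile (fun p => p.1 == f)).map Prod.snd) ::
        pvRuns (rest.dropWhile (fun p => p.1 == f))
  termination_by l => l.length
  decreasing_by
    exact Nat.lt_succ_of_le (List.length_dropWhile_le _ _)

-- B's loop over the runs: one marker at each boundary where the flag changes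
def pvEmit (prev : Bool) : List (Bool × List Char) → List Char
  | [] => []
  | (f, cs) :: rest =>
      (if f ≠ prev then (if f then pvRED else pvRESET) else []) ++ cs ++ pvEmit f rest

def get_diff_str_alt (expected : String) (found : String) : String :=
  String.ofList (pvEmit false (pvRuns (pvFlags expected.toList 0 found.toList)) ++ pvRESET)

-- ===== PRECONDITION & SPEC =====
def Spec_get_diff_str (expected : String) (found : String) (out : String) : Prop := out = get_diff_str_alt expected found
instance (expected : String) (found : String) (out : String) : Decidable (Spec_get_diff_str expected found out) := by unfold Spec_get_diff_str; infer_instance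

-- ===== CLAIM (what is proved, stated in full; the proofs are below) =====
def Claim_equal_get_diff_str : Prop := ∀ (expected : String) (found : String), Dom_get_diff_str expected found → Spec_get_diff_str expected found (get_diff_str expected found)

-- ===== LEMMAS AND PROOFS =====

-- the common abstraction: a per-pair state machine emitting a marker whenever the flag flips
def pvMachine (p : Bool) : List (Bool × Char) → List Char
  | [] => []
  | (f, c) :: rest =>
      (if f ≠ p then (if f then pvRED else pvRESET) else []) ++ [c] ++ pvMachine f rest

-- A's loop computes the state machine over the flagged characters
theorem pvALoop_eq_machine (el : List Char) :
    ∀ (l : List Char) (i : Nat) (d : List Char) (p : Bool),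
      (pvALoop el i d p l).1 = d ++ pvMachine p (pvFlags el i l) := by
  intro l
  induction l with
  | nil => intro i d p; simp [pvALoop, pvFlags, pvMachine]
  | cons c rest ih =>
      intro i d p
      by_cases hlen : el.length ≤ i
      · by_cases hp : p
        · simp [pvALoop, pvFlags, pvMachine, hlen, hp, ih]
        · simp [pvALoop, pvFlags, pvMachine, hlen, hp, ih]
      · by_cases hc : c = el[i]?.getD ' '
        · by_cases hp : p
          · simp [pvALoop, pvFlags, pvMachine, List.getD, hlen, hc, hp, ih]
          · simp [pvALoop, pvFlags, pvMachine, List.getD, hlen, hc, hp, ih]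
        · by_cases hp : p
          · simp [pvALoop, pvFlags, pvMachine, List.getD, hlen, hc, hp, ih]
          · simp [pvALoop, pvFlags, pvMachine, List.getD, hlen, hc, hp, ih]

-- within a run of constant flag f the machine emits no marker and keeps state f
theorem pvMachine_const_run (f : Bool) :
    ∀ (grp rest : List (Bool × Char)), (∀ x ∈ grp, x.1 = f) →
      pvMachine f (grp ++ rest) = grp.map Prod.snd ++ pvMachine f rest := by
  intro grp
  induction grp with
  | nil => intro rest _; simp
  | cons x tl ih =>
      intro rest h
      obtain ⟨f', c⟩ := x
      have hf : f' = f := h (f', c) (List.mem_cons_self)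
      subst hf
      simp only [List.cons_append, pvMachine, ne_eq, not_true_eq_false, List.map_cons]
      simp [ih rest (fun x hx => h x (List.mem_cons_of_mem _ hx))]

-- the machine over the pairs equals B's emission over the grouped runs
theorem pvMachine_eq_emit :
    ∀ (pairs : List (Bool × Char)) (p : Bool),
      pvMachine p pairs = pvEmit p (pvRuns pairs) := by
  intro pairs
  induction pairs using pvRuns.induct with
  | case1 => intro p; simp [pvMachine, pvRuns, pvEmit]
  | case2 f c rest ih =>
      intro p
      have hsplit : rest.takeWhile (fun q => q.1 == f) ++ rest.dropWhile (fun q => q.1 == f) = rest :=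
        List.takeWhile_append_dropWhile
      have hconst : ∀ x ∈ rest.takeWhile (fun q => q.1 == f), x.1 = f := by
        intro x hx
        have := List.mem_takeWhile_imp hx
        simpa using this
      calc pvMachine p ((f, c) :: rest)
          = (if f ≠ p then (if f then pvRED else pvRESET) else []) ++ [c] ++ pvMachine f rest := rfl
        _ = (if f ≠ p then (if f then pvRED else pvRESET) else []) ++ [c] ++
              pvMachine f (rest.takeWhile (fun q => q.1 == f) ++ rest.dropWhile (fun q => q.1 == f)) := by
              rw [hsplit]
        _ = (if f ≠ p then (if f then pvRED else pvRESET) else []) ++ [c] ++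
              ((rest.takeWhile (fun q => q.1 == f)).map Prod.snd ++
                pvMachine f (rest.dropWhile (fun q => q.1 == f))) := by
              rw [pvMachine_const_run f _ _ hconst]
        _ = pvEmit p (pvRuns ((f, c) :: rest)) := by
              rw [ih]
              simp [pvRuns, pvEmit]

-- ===== VERDICT (by name: the statement is the Claim_ definition above) =====
theorem get_diff_str_spec : Claim_equal_get_diff_str := by
  intro expected found _
  unfold Spec_get_diff_str get_diff_str get_diff_str_alt
  rw [pvALoop_eq_machine, pvMachine_eq_emit]
  simp
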